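-- pv_equiv track=rewrite | github.com/JEfloyd1567/competitive-programming | interview.py | trib_memo
-- ===== SOURCE A (Python) =====
-- mem={}
--
-- def trib_memo(n, back):
-- 	ans = 0
-- 	if((n, back) in mem):
-- 		ans = mem[(n, back)]
-- 	else:
-- 		if(n <= 1):
-- 			return 1
-- 		else:
-- 			ans += 1
-- 			for i in range(1, back + 1):
-- 				ans += trib_memo(n - i, back)
-- 		mem[(n, back)] = ans
-- 	return ans
-- ===== SOURCE B (Python) =====
-- def trib_memo(n, back):
--     # f(m) = 1 for m <= 1; f(m) = 1 + sum of the previous `back` values otherwise.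
--     # Single upward pass keeping all values and a sliding-window sum: O(n) time.
--     if n <= 1:
--         return 1
--     if back <= 0:
--         return 1
--     vals = [1, 1]          # f(0), f(1)
--     s = back               # sum of f(m-back) .. f(m-1) for m = 2 (all those are 1)
--     cur = 1
--     for m in range(2, n + 1):
--         cur = 1 + s
--         vals.append(cur)
--         s += cur - (vals[m - back] if m - back >= 0 else 1)
--     return cur
-- ===== Notes on version B (the rewrite author's own statement) =====
-- stated objective: faster
-- what changed: replaces A's memoized top-down recursion (a dict keyed by (n, back) filled by recursive calls) with a single bottom-up loop that keeps the computed values in a list and maintains a sliding-window sum of the last `back` of them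
-- outside the precondition, e.g. on trib_memo(950, 1): A returns 950, B returns 950
import Mathlib
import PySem

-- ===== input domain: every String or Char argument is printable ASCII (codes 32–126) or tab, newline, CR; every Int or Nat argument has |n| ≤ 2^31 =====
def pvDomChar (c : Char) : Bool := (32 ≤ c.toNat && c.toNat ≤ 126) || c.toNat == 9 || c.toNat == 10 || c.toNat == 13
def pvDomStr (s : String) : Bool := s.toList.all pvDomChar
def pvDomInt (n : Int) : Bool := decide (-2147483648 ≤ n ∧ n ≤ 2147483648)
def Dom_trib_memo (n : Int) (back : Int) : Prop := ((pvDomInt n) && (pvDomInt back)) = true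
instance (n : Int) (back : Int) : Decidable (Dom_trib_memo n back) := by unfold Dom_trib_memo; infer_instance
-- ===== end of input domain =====

-- B replaces A's memoized top-down recursion by one bottom-up pass with a sliding-window
-- sum of the previous `back` values (objective: faster). A's module-level memo dict is
-- modelled as a fresh memo per call; the equivalence is about the return value.

-- ===== PORT A =====
-- A's recursion, with the memo dict threaded through.  The loop list carries the proof
-- "each element of range(1, back+1) is ≥ 1", needed only for termination.
def tribIs (back : Int) : List {i : Int // 1 ≤ i} :=
  (PySem.List.pyRange 1 (back + 1) 1).attach.map
    (fun x => (⟨x.1, (PySem.List.mem_pyRange_one.mp x.2).1⟩ : {i : Int // 1 ≤ i}))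

mutual
def tribGoA (n : Int) (back : Int) (mem : PySem.Dict (Int × Int) Int) :
    Int × PySem.Dict (Int × Int) Int :=
  match PySem.Dict.get? mem (n, back) with
  | some v => (v, mem)
  | none =>
    if hn : n ≤ 1 then (1, mem)
    else
      let r := tribFoldA n back (by omega) (tribIs back) 1 mem
      (r.1, PySem.Dict.insert r.2 (n, back) r.1)
termination_by (n.toNat, (tribIs back).length + 1)
decreasing_by
  apply Prod.Lex.right; omega

def tribFoldA (n : Int) (back : Int) (hn : 1 < n) (is : List {i : Int // 1 ≤ i})
    (ans : Int) (mem : PySem.Dict (Int × Int) Int) : Int × PySem.Dict (Int × Int) Int :=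
  match is with
  | [] => (ans, mem)
  | i :: rest =>
    let p := tribGoA (n - i.1) back mem
    tribFoldA n back hn rest (ans + p.1) p.2
termination_by (n.toNat, is.length)
decreasing_by
  · apply Prod.Lex.left; have := i.2; omega
  · apply Prod.Lex.right; simp
end

def trib_memo (n : Int) (back : Int) : Int :=
  (tribGoA n back PySem.Dict.empty).1

-- ===== PORT B =====
def trib_memo_alt (n : Int) (back : Int) : Int :=
  if n ≤ 1 then 1
  else if back ≤ 0 then 1
  else
    -- state: (vals, s, cur)
    let st := (PySem.List.pyRange 2 (n + 1) 1).foldl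
      (fun (st : List Int × Int × Int) m =>
        let cur := 1 + st.2.1
        let vals := st.1 ++ [cur]
        let s := st.2.1 + cur - (if 0 ≤ m - back then PySem.List.pyGetD vals (m - back) 1 else 1)
        (vals, s, cur))
      ([1, 1], back, 1)
    st.2.2

-- ===== PRECONDITION & SPEC =====
-- Pre_ excludes back ≥ 1 with n > 900: there A's recursion descends ~n frames and hits
-- Python's default recursion limit (RecursionError) near n ≈ 1000; the safety margin below that
-- stack-state-dependent limit also excludes a band of inputs on which A still returns.
def Pre_trib_memo (n : Int) (back : Int) : Prop := back ≤ 0 ∨ n ≤ 900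
instance (n : Int) (back : Int) : Decidable (Pre_trib_memo n back) := by
  unfold Pre_trib_memo; infer_instance
def pvWitness_trib_memo : Int × Int := (10, 3)

def Spec_trib_memo (n : Int) (back : Int) (out : Int) : Prop := out = trib_memo_alt n back
instance (n : Int) (back : Int) (out : Int) : Decidable (Spec_trib_memo n back out) := by
  unfold Spec_trib_memo; infer_instance

-- ===== CLAIM (what is proved, stated in full; the proofs are below) =====
def Claim_equal_trib_memo : Prop :=
  ∀ (n : Int) (back : Int), Dom_trib_memo n back → Pre_trib_memo n back →
    Spec_trib_memo n back (trib_memo n back)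

-- ===== LEMMAS AND PROOFS =====

-- the mathematical recurrence both programs compute: value 1 up to index 1,
-- then 1 + sum of the previous b values (Nat subtraction clamps, and the value at 0 is 1,
-- which matches Python's f(m) = 1 for all m ≤ 1 including negatives)
def tribF (b : Nat) (m : Nat) : Int :=
  if m ≤ 1 then 1
  else 1 + ∑ j ∈ Finset.range b, tribF b (m - 1 - j)
termination_by m
decreasing_by omega

def tribV (n : Int) (back : Int) : Int := tribF back.toNat n.toNat

theorem tribF_le_one (b m : Nat) (h : m ≤ 1) : tribF b m = 1 := by
  rw [tribF]; simp [h]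

theorem tribV_le_one (n back : Int) (h : n ≤ 1) : tribV n back = 1 := by
  unfold tribV; exact tribF_le_one _ _ (by omega)

-- A's loop sum, as a list sum over range(1, back+1)
theorem tribV_rec (n back : Int) (hn : 1 < n) :
    tribV n back =
      1 + ((PySem.List.pyRange 1 (back + 1) 1).map (fun i => tribV (n - i) back)).sum := by
  unfold tribV
  rw [tribF]
  have h1 : ¬ n.toNat ≤ 1 := by omega
  simp only [h1, if_false]
  congr 1
  rw [PySem.List.pyRange_one 1 (back + 1),
    show (back + 1 - 1).toNat = back.toNat from by omega, List.map_map]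
  have hb : ∑ j ∈ Finset.range back.toNat, tribF back.toNat (n.toNat - 1 - j)
      = ((List.range back.toNat).map (fun j => tribF back.toNat (n.toNat - 1 - j))).sum := rfl
  rw [hb]
  apply congrArg List.sum
  apply List.map_congr_left
  intro k hk
  show tribF back.toNat (n.toNat - 1 - k) = tribV (n - (1 + (k : Int))) back
  unfold tribV
  congr 1
  omega

-- memo-correctness invariant
def GoodMem (mem : PySem.Dict (Int × Int) Int) : Prop :=
  ∀ k v, PySem.Dict.get? mem k = some v → v = tribV k.1 k.2

theorem goodMem_empty : GoodMem PySem.Dict.empty := by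
  intro k v h
  simp [PySem.Dict.get?_empty] at h

theorem goodMem_insert (mem : PySem.Dict (Int × Int) Int) (n back : Int)
    (h : GoodMem mem) : GoodMem (PySem.Dict.insert mem (n, back) (tribV n back)) := by
  intro k v hk
  rw [PySem.Dict.get?_insert] at hk
  by_cases he : k = (n, back)
  · rw [if_pos he] at hk
    subst he
    exact (Option.some.inj hk).symm
  · rw [if_neg he] at hk
    exact h k v hk

theorem sum_over_is (n back : Int) :
    ((tribIs back).map (fun i => tribV (n - i.1) back)).sum
    = ((PySem.List.pyRange 1 (back + 1) 1).map (fun i => tribV (n - i) back)).sum := by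
  unfold tribIs
  rw [List.map_map]
  refine congrArg List.sum ?_
  simp only [Function.comp_def]
  exact List.attach_map_val (f := fun v => tribV (n - v) back)

theorem tribFoldA_ok (N : Nat)
    (ih : ∀ (n back : Int) (mem : PySem.Dict (Int × Int) Int), n.toNat < N → GoodMem mem →
      (tribGoA n back mem).1 = tribV n back ∧ GoodMem (tribGoA n back mem).2)
    (n back : Int) (hn : 1 < n) (hN : n.toNat ≤ N) :
    ∀ (is : List {i : Int // 1 ≤ i}) (acc : Int) (mem : PySem.Dict (Int × Int) Int),
      GoodMem mem →
      (tribFoldA n back hn is acc mem).1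
          = acc + (is.map (fun i => tribV (n - i.1) back)).sum ∧
        GoodMem (tribFoldA n back hn is acc mem).2 := by
  intro is
  induction is with
  | nil => intro acc mem hg; rw [tribFoldA]; simpa using hg
  | cons i rest ihr =>
    intro acc mem hg
    rw [tribFoldA]
    have hlt : (n - i.1).toNat < N := by
      have := i.2; omega
    obtain ⟨h1, h2⟩ := ih (n - i.1) back mem hlt hg
    obtain ⟨h3, h4⟩ := ihr (acc + (tribGoA (n - i.1) back mem).1) (tribGoA (n - i.1) back mem).2 h2
    constructor
    · rw [h3, h1]; simp; ring
    · exact h4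

theorem tribGoA_ok : ∀ (N : Nat) (n back : Int) (mem : PySem.Dict (Int × Int) Int),
    n.toNat < N → GoodMem mem →
    (tribGoA n back mem).1 = tribV n back ∧ GoodMem (tribGoA n back mem).2 := by
  intro N
  induction N with
  | zero => intro n back mem h; omega
  | succ N ihN =>
    intro n back mem hN hg
    rw [tribGoA]
    cases hget : PySem.Dict.get? mem (n, back) with
    | some v =>
      dsimp only
      exact ⟨hg (n, back) v hget, hg⟩
    | none =>
      dsimp only
      by_cases hn : n ≤ 1
      · rw [dif_pos hn]
        exact ⟨(tribV_le_one n back hn).symm, hg⟩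
      · rw [dif_neg hn]
        dsimp only
        have hn' : 1 < n := by omega
        obtain ⟨hf1, hf2⟩ := tribFoldA_ok N ihN n back hn' (by omega)
          (tribIs back) 1 mem hg
        rw [sum_over_is, ← tribV_rec n back hn'] at hf1
        refine ⟨hf1, ?_⟩
        rw [hf1]
        exact goodMem_insert _ n back hf2

theorem trib_memo_eq_tribV (n back : Int) : trib_memo n back = tribV n back := by
  unfold trib_memo
  exact (tribGoA_ok (n.toNat + 1) n back PySem.Dict.empty (by omega) goodMem_empty).1

-- ===== B side =====

-- the sliding-window sum of the b values before position m+1, i.e. tribF at m, m-1, …, m-b+1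
def tribS (b : Nat) (m : Nat) : Int := ∑ j ∈ Finset.range b, tribF b (m - j)

theorem tribF_succ (b : Nat) (m : Nat) : tribF b (m + 2) = 1 + tribS b (m + 1) := by
  rw [tribF]
  have h2 : ¬ m + 2 ≤ 1 := by omega
  rw [if_neg h2]
  show _ = 1 + ∑ j ∈ Finset.range b, tribF b (m + 1 - j)
  have h4 : ∀ j ∈ Finset.range b, tribF b (m + 2 - 1 - j) = tribF b (m + 1 - j) := by
    intro j _
    have h3 : m + 2 - 1 - j = m + 1 - j := by omega
    rw [h3]
  rw [Finset.sum_congr rfl h4]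

theorem tribS_succ (c : Nat) (m : Nat) :
    tribS (c + 1) (m + 2) = tribS (c + 1) (m + 1) + tribF (c + 1) (m + 2) - tribF (c + 1) (m + 1 - c) := by
  unfold tribS
  rw [Finset.sum_range_succ']
  rw [Finset.sum_range_succ (fun j => tribF (c + 1) (m + 1 - j)) c]
  have h1 : ∀ j, m + 2 - (j + 1) = m + 1 - j := by omega
  simp only [h1, Nat.sub_zero]
  ring

-- B's loop invariant, by induction on the number of iterations
theorem altLoop_inv (back : Int) (hb : 1 ≤ back) (t : Nat) :
    (PySem.List.pyRange 2 (2 + (t : Int)) 1).foldl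
      (fun (st : List Int × Int × Int) m =>
        let cur := 1 + st.2.1
        let vals := st.1 ++ [cur]
        let s := st.2.1 + cur - (if 0 ≤ m - back then PySem.List.pyGetD vals (m - back) 1 else 1)
        (vals, s, cur))
      ([1, 1], back, 1)
    = ((List.range (t + 2)).map (fun k => tribF back.toNat k),
       tribS back.toNat (t + 1),
       tribF back.toNat (t + 1)) := by
  induction t with
  | zero =>
    rw [PySem.List.pyRange_one_eq_nil (by omega)]
    simp only [List.foldl_nil]
    have h0 : tribF back.toNat 0 = 1 := tribF_le_one _ _ (by omega)
    have h1 : tribF back.toNat 1 = 1 := tribF_le_one _ _ (by omega)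
    have hs : tribS back.toNat 1 = back := by
      unfold tribS
      have : ∀ j ∈ Finset.range back.toNat, tribF back.toNat (1 - j) = 1 := by
        intro j _; exact tribF_le_one _ _ (by omega)
      rw [Finset.sum_congr rfl this]
      simp; omega
    simp [List.range_succ, h0, h1, hs]
  | succ t iht =>
    have hsplit : PySem.List.pyRange 2 (2 + ((t : Int) + 1)) 1
        = PySem.List.pyRange 2 (2 + (t : Int)) 1 ++ [2 + (t : Int)] := by
      have h := PySem.List.pyRange_one_succ_right (a := 2) (b := 2 + (t : Int)) (by omega)
      rw [show (2 : Int) + ((t : Int) + 1) = 2 + (t : Int) + 1 by ring, h]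
    push_cast
    rw [hsplit, List.foldl_append, iht]
    simp only [List.foldl_cons, List.foldl_nil]
    obtain ⟨c, hc⟩ : ∃ c, back.toNat = c + 1 := ⟨back.toNat - 1, by omega⟩
    have hcur : 1 + tribS back.toNat (t + 1) = tribF back.toNat (t + 2) :=
      (tribF_succ back.toNat t).symm
    -- the subtracted window element is tribF at (t + 2) - back, clamped at 0
    have hterm : (if 0 ≤ 2 + (t : Int) - back then
          PySem.List.pyGetD ((List.range (t + 2)).map (fun k => tribF back.toNat k)
              ++ [1 + tribS back.toNat (t + 1)]) (2 + (t : Int) - back) 1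
        else 1) = tribF back.toNat (t + 1 - c) := by
      by_cases hpos : 0 ≤ 2 + (t : Int) - back
      · rw [if_pos hpos]
        have hlist : (List.range (t + 2)).map (fun k => tribF back.toNat k)
              ++ [1 + tribS back.toNat (t + 1)]
            = (List.range (t + 3)).map (fun k => tribF back.toNat k) := by
          rw [show t + 3 = (t + 2) + 1 from by omega, List.range_succ, List.map_append, hcur]
          simp [List.range_succ]
        rw [hlist]
        have hidx : 2 + (t : Int) - back = ((t + 2 - back.toNat : Nat) : Int) := by omega
        rw [hidx, PySem.List.pyGetD_natCast]
        have hlt : t + 2 - back.toNat < t + 3 := by omega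
        rw [List.getD_eq_getElem _ _ (by simpa using hlt)]
        simp only [List.getElem_map, List.getElem_range]
        congr 1
        omega
      · rw [if_neg hpos]
        have h0 : t + 1 - c = 0 := by omega
        rw [h0, tribF_le_one _ _ (by omega)]
    rw [hterm]
    refine congrArg₂ _ ?_ (congrArg₂ _ ?_ ?_)
    · -- the list of values
      rw [hcur, show t + 1 + 2 = (t + 2) + 1 from by omega, List.range_succ, List.map_append]
      simp [List.range_succ]
    · -- the sliding-window sum
      rw [hc] at hcur ⊢
      rw [show t + 1 + 1 = t + 2 from by omega]
      have h := tribS_succ c t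
      omega
    · -- the current value
      rw [show t + 1 + 1 = t + 2 from by omega]
      exact hcur

theorem trib_memo_alt_eq_tribV (n back : Int) : trib_memo_alt n back = tribV n back := by
  unfold trib_memo_alt
  by_cases hn : n ≤ 1
  · rw [if_pos hn, tribV_le_one n back hn]
  · rw [if_neg hn]
    by_cases hb : back ≤ 0
    · rw [if_pos hb]
      unfold tribV
      rw [tribF]
      have h1 : ¬ n.toNat ≤ 1 := by omega
      have h2 : back.toNat = 0 := by omega
      simp [h1, h2]
    · rw [if_neg hb]
      have hb' : 1 ≤ back := by omega
      obtain ⟨t, ht⟩ : ∃ t : Nat, n + 1 = 2 + ((t : Int) + 1) := ⟨(n - 2).toNat, by omega⟩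
      have hinv := altLoop_inv back hb' (t + 1)
      push_cast at hinv
      rw [show (2 : Int) + ((t : Int) + 1) = n + 1 from ht.symm] at hinv
      rw [hinv]
      show tribF back.toNat (t + 1 + 1) = tribV n back
      unfold tribV
      rw [show n.toNat = t + 1 + 1 from by omega]

-- ===== VERDICT (by name: the statement is the Claim_ definition above) =====
theorem trib_memo_spec : Claim_equal_trib_memo := by
  intro n back _ _
  unfold Spec_trib_memo
  rw [trib_memo_eq_tribV, trib_memo_alt_eq_tribV]
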